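-- pv_equiv track=rewrite | github.com/College-exercises/python | lab2/exercices.py | ex9
-- ===== SOURCE A (Python) =====
-- def ex9(matrix: list[list[int]]) -> list[tuple[int, int]]:
--     out: list[tuple[int, int]] = []
--
--     for i in range(len(matrix) - 1, 0 - 1, -1):
--         for j in range(len(matrix[0])):
--             for k in range(0, i):
--                 if matrix[i][j] < matrix[k][j]:
--                     out.append((i, j))
--                     break
--
--     return out
-- ===== SOURCE B (Python) =====
-- def ex9(matrix: list[list[int]]) -> list[tuple[int, int]]:
--     # per-column running prefix maximum: O(rows*cols) instead of A's O(rows^2*cols)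
--     if not matrix:
--         return []
--     w = len(matrix[0])
--     maxes = matrix[0][:w]
--     rows_hits = []
--     for i in range(1, len(matrix)):
--         row = matrix[i][:w]
--         hits = [(i, j) for j, (x, m) in enumerate(zip(row, maxes)) if x < m]
--         maxes = [m if x <= m else x for x, m in zip(row, maxes)]
--         rows_hits.append(hits)
--     return [p for hits in reversed(rows_hits) for p in hits]
-- ===== Notes on version B (the rewrite author's own statement) =====
-- stated objective: faster
-- what changed: replaces the per-cell backward scan over all earlier rows by a single forward pass that keeps a per-column running prefix maximum, collecting each row's hit list and flattening them in reverse row order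
import Mathlib
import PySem

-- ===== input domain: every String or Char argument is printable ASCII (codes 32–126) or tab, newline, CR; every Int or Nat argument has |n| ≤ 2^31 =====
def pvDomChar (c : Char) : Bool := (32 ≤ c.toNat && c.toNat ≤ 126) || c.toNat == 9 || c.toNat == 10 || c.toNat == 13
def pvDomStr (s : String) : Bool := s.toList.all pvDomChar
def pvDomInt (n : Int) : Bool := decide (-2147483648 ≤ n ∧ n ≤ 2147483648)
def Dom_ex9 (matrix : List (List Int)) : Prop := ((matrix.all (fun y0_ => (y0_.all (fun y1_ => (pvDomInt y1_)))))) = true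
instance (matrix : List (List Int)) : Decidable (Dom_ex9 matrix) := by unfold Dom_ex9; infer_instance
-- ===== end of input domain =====

-- B replaces A's O(rows^2*cols) backward rescans by one forward pass with a per-column running prefix maximum (asymptotically faster).

-- ===== PORT A =====
-- inner 'for k in range(0, i): if matrix[i][j] < matrix[k][j]: out.append((i,j)); break'
def ex9InnerK (matrix : List (List Int)) (i j : Int) : List Int → List (Int × Int) → List (Int × Int)
  | [], out => out
  | k :: ks, out =>
    if PySem.List.pyGetD (PySem.List.pyGetD matrix i []) j 0 <
       PySem.List.pyGetD (PySem.List.pyGetD matrix k []) j 0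
    then out ++ [(i, j)]
    else ex9InnerK matrix i j ks out

def ex9 (matrix : List (List Int)) : List (Int × Int) :=
  (PySem.List.pyRange ((matrix.length : Int) - 1) (0 - 1) (-1)).foldl (fun out i =>
    (PySem.List.pyRange 0 ((PySem.List.pyGetD matrix 0 []).length : Int) 1).foldl (fun out j =>
      ex9InnerK matrix i j (PySem.List.pyRange 0 i 1) out) out) []

-- ===== PORT B =====
def ex9_alt (matrix : List (List Int)) : List (Int × Int) :=
  match matrix with
  | [] => []
  | r0 :: _rest =>
    let w : Int := (r0.length : Int)
    let st := (PySem.List.pyRange 1 (matrix.length : Int) 1).foldl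
      (fun (st : List Int × List (List (Int × Int))) i =>
        let row := PySem.List.slice (PySem.List.pyGetD matrix i []) none (some w)
        let hits := (PySem.List.enumerate (row.zip st.1) 0).filterMap
          (fun p => if p.2.1 < p.2.2 then some (i, p.1) else none)
        let maxes := (row.zip st.1).map (fun p => if p.1 ≤ p.2 then p.2 else p.1)
        (maxes, st.2 ++ [hits]))
      (PySem.List.slice r0 none (some w), ([] : List (List (Int × Int))))
    st.2.reverse.flatMap (fun hits => hits)

-- ===== PRECONDITION & SPEC =====
-- Pre_ excludes exactly the ragged matrices on which A raises IndexError: a row shorter than the first row.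
def Pre_ex9 (matrix : List (List Int)) : Prop :=
  ∀ row ∈ matrix, matrix.headI.length ≤ row.length
instance (matrix : List (List Int)) : Decidable (Pre_ex9 matrix) := by unfold Pre_ex9; infer_instance
def pvWitness_ex9 : List (List Int) := [[1, 2], [3, 0]]

def Spec_ex9 (matrix : List (List Int)) (out : List (Int × Int)) : Prop := out = ex9_alt matrix
instance (matrix : List (List Int)) (out : List (Int × Int)) : Decidable (Spec_ex9 matrix out) := by unfold Spec_ex9; infer_instance

-- ===== CLAIM (what is proved, stated in full; the proofs are below) =====
def Claim_equal_ex9 : Prop := ∀ (matrix : List (List Int)), Dom_ex9 matrix → Pre_ex9 matrix → Spec_ex9 matrix (ex9 matrix)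

-- ===== LEMMAS AND PROOFS =====

def pvM (matrix : List (List Int)) (i j : Nat) : Int := (matrix.getD i []).getD j 0

def pvBad (matrix : List (List Int)) (i j : Nat) : Bool :=
  (List.range i).any (fun k => decide (pvM matrix i j < pvM matrix k j))

def pvHits (matrix : List (List Int)) (i : Nat) : List (Int × Int) :=
  ((List.range matrix.headI.length).filter (fun j => pvBad matrix i j)).map
    (fun (j : Nat) => ((i : Int), ((j : Nat) : Int)))

def pvColmax (matrix : List (List Int)) : Nat → Nat → Int
  | 0, j => pvM matrix 0 j
  | t + 1, j =>
    if pvM matrix (t + 1) j ≤ pvColmax matrix t j then pvColmax matrix t j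
    else pvM matrix (t + 1) j

lemma pvInnerK_eq (matrix : List (List Int)) (i j : Int) (ks : List Int) (out : List (Int × Int)) :
    ex9InnerK matrix i j ks out =
      if ks.any (fun k => decide (PySem.List.pyGetD (PySem.List.pyGetD matrix i []) j 0 <
            PySem.List.pyGetD (PySem.List.pyGetD matrix k []) j 0))
      then out ++ [(i, j)] else out := by
  induction ks with
  | nil => simp [ex9InnerK]
  | cons k ks ih =>
    by_cases h : PySem.List.pyGetD (PySem.List.pyGetD matrix i []) j 0 <
        PySem.List.pyGetD (PySem.List.pyGetD matrix k []) j 0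
    · simp [ex9InnerK, h]
    · simp [ex9InnerK, h, ih]

lemma pvHeadI (matrix : List (List Int)) : PySem.List.pyGetD matrix 0 [] = matrix.headI := by
  rw [PySem.List.pyGetD_zero]; cases matrix
  · simp [List.headI]
    rfl
  · rfl

lemma pvHitsI_cast (matrix : List (List Int)) (i : Nat) :
    ((PySem.List.pyRange 0 ((PySem.List.pyGetD matrix 0 []).length : Int) 1).filter
        (fun j => (PySem.List.pyRange 0 (i : Int) 1).any
          (fun k => decide (PySem.List.pyGetD (PySem.List.pyGetD matrix (i : Int) []) j 0 <
            PySem.List.pyGetD (PySem.List.pyGetD matrix k []) j 0)))).map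
      (fun j => ((i : Int), j)) = pvHits matrix i := by
  simp [PySem.List.pyRange_zero_natCast, List.filter_map, List.any_map, pvHits, pvBad, pvM,
    Function.comp_def, pvHeadI, List.map_map]

lemma pvA_char (matrix : List (List Int)) :
    ex9 matrix = ((List.range matrix.length).reverse).flatMap (pvHits matrix) := by
  unfold ex9
  have hbody : (fun (out : List (Int × Int)) (i : Int) =>
      (PySem.List.pyRange 0 ((PySem.List.pyGetD matrix 0 []).length : Int) 1).foldl (fun out j =>
        ex9InnerK matrix i j (PySem.List.pyRange 0 i 1) out) out) =
      (fun out i => out ++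
        ((PySem.List.pyRange 0 ((PySem.List.pyGetD matrix 0 []).length : Int) 1).filter
          (fun j => (PySem.List.pyRange 0 i 1).any
            (fun k => decide (PySem.List.pyGetD (PySem.List.pyGetD matrix i []) j 0 <
              PySem.List.pyGetD (PySem.List.pyGetD matrix k []) j 0)))).map (fun j => (i, j))) := by
    funext out i
    calc (PySem.List.pyRange 0 ((PySem.List.pyGetD matrix 0 []).length : Int) 1).foldl (fun out j =>
        ex9InnerK matrix i j (PySem.List.pyRange 0 i 1) out) out
        = (PySem.List.pyRange 0 ((PySem.List.pyGetD matrix 0 []).length : Int) 1).foldl (fun out j =>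
            if (PySem.List.pyRange 0 i 1).any
              (fun k => decide (PySem.List.pyGetD (PySem.List.pyGetD matrix i []) j 0 <
                PySem.List.pyGetD (PySem.List.pyGetD matrix k []) j 0))
            then out ++ [(i, j)] else out) out := by
          exact PySem.List.foldl_congr_mem _ _ _ _ (fun acc x _ => pvInnerK_eq matrix i x (PySem.List.pyRange 0 i 1) acc)
      _ = _ := PySem.List.foldl_append_if _ _ _ _
  rw [hbody, PySem.List.foldl_append_eq_flatMap, List.nil_append]
  rw [show ((0 : Int) - 1) = -1 by norm_num, PySem.List.pyRange_neg_one_eq_reverse]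
  rw [show ((matrix.length : Int) - 1 + 1) = (matrix.length : Int) by ring,
    show ((-1 : Int) + 1) = 0 by norm_num]
  have hflat : ∀ (F : Int → List (Int × Int)) (n : Nat),
      (PySem.List.pyRange 0 (n : Int) 1).reverse.flatMap F =
        ((List.range n).reverse).flatMap (fun (i : Nat) => F ((i : Nat) : Int)) := by
    intro F n
    rw [PySem.List.pyRange_zero_natCast, ← List.map_reverse]
    exact List.flatMap_map _ _ _
  rw [hflat]
  simp only [pvHitsI_cast]

lemma pvColmax_ge (matrix : List (List Int)) (t k j : Nat) (hk : k ≤ t) :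
    pvM matrix k j ≤ pvColmax matrix t j := by
  induction t with
  | zero => interval_cases k; simp [pvColmax]
  | succ t ih =>
    by_cases h : k = t + 1
    · subst h; simp only [pvColmax]; split_ifs with h' <;> omega
    · have := ih (by omega)
      simp only [pvColmax]; split_ifs with h' <;> omega

lemma pvLt_colmax (matrix : List (List Int)) (t j : Nat) (x : Int) :
    x < pvColmax matrix t j ↔ ∃ k, k ≤ t ∧ x < pvM matrix k j := by
  induction t with
  | zero =>
    simp only [pvColmax]
    constructor
    · exact fun h => ⟨0, le_refl 0, h⟩
    · rintro ⟨k, hk, h⟩; interval_cases k; exact h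
  | succ t ih =>
    simp only [pvColmax]
    split_ifs with h
    · rw [ih]
      constructor
      · rintro ⟨k, hk, hx⟩; exact ⟨k, by omega, hx⟩
      · rintro ⟨k, hk, hx⟩
        rcases Nat.lt_or_ge k (t + 1) with hk' | hk'
        · exact ⟨k, by omega, hx⟩
        · have : k = t + 1 := by omega
          subst this
          exact ih.mp (by omega)
    · constructor
      · exact fun hx => ⟨t + 1, le_refl _, hx⟩
      · rintro ⟨k, hk, hx⟩
        rcases Nat.lt_or_ge k (t + 1) with hk' | hk'
        · have h1 : pvM matrix k j ≤ pvColmax matrix t j := pvColmax_ge matrix t k j (by omega)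
          omega
        · have : k = t + 1 := by omega
          subst this; exact hx

lemma pvBad_succ (matrix : List (List Int)) (t j : Nat) :
    pvBad matrix (t + 1) j = decide (pvM matrix (t + 1) j < pvColmax matrix t j) := by
  have : (pvBad matrix (t + 1) j = true) ↔ (pvM matrix (t + 1) j < pvColmax matrix t j) := by
    rw [pvLt_colmax]
    simp only [pvBad, List.any_eq_true, List.mem_range, decide_eq_true_eq]
    constructor
    · rintro ⟨k, hk, h⟩; exact ⟨k, by omega, h⟩
    · rintro ⟨k, hk, h⟩; exact ⟨k, by omega, h⟩
  rcases Bool.eq_false_or_eq_true (pvBad matrix (t + 1) j) with h | h <;>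
    simp_all

lemma pvSelfMap (l : List Int) : (List.range l.length).map (fun j => l.getD j 0) = l := by
  apply List.ext_getElem
  · simp
  · intro k h1 h2
    simp [List.getD_eq_getElem?_getD, List.getElem?_eq_getElem h2]

lemma pvEnumMapRange {α : Type} (f : Nat → α) (w : Nat) :
    PySem.List.enumerate ((List.range w).map f) 0 =
      (List.range w).map (fun (j : Nat) => (((j : Nat) : Int), f j)) := by
  apply List.ext_getElem
  · simp [PySem.List.length_enumerate]
  · intro k h1 h2
    have hk : k < w := by simpa [PySem.List.length_enumerate] using h1
    simp [PySem.List.getElem_enumerate]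

lemma pvFilterMapIfP {α β : Type} (p : α → Prop) [DecidablePred p] (e : α → β) (l : List α) :
    l.filterMap (fun a => if p a then some (e a) else none) =
      (l.filter (fun a => decide (p a))).map e := by
  induction l with
  | nil => rfl
  | cons x xs ih =>
    by_cases h : p x <;> simp [h, ih]

def pvStep (matrix : List (List Int)) (w : Int)
    (st : List Int × List (List (Int × Int))) (i : Int) :
    List Int × List (List (Int × Int)) :=
  let row := PySem.List.slice (PySem.List.pyGetD matrix i []) none (some w)
  let hits := (PySem.List.enumerate (row.zip st.1) 0).filterMap
    (fun p => if p.2.1 < p.2.2 then some (i, p.1) else none)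
  let maxes := (row.zip st.1).map (fun p => if p.1 ≤ p.2 then p.2 else p.1)
  (maxes, st.2 ++ [hits])

def pvMx (matrix : List (List Int)) (w t : Nat) : List Int :=
  (List.range w).map (fun j => pvColmax matrix t j)

lemma pvStep_eq (matrix : List (List Int)) (w t : Nat) (hs : List (List (Int × Int)))
    (hrow : PySem.List.slice (PySem.List.pyGetD matrix ((t + 1 : Nat) : Int) []) none (some (w : Int)) =
      (List.range w).map (fun j => pvM matrix (t + 1) j))
    (hwlen : matrix.headI.length = w) :
    pvStep matrix (w : Int) (pvMx matrix w t, hs) ((t + 1 : Nat) : Int) =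
      (pvMx matrix w (t + 1), hs ++ [pvHits matrix (t + 1)]) := by
  unfold pvStep pvMx
  simp only [hrow]
  rw [List.zip_map', pvEnumMapRange, List.filterMap_map, List.map_map]
  simp only [Function.comp_def, Prod.mk.injEq]
  constructor
  · apply List.map_congr_left
    intro j _
    simp [pvColmax]
  · congr 1
    rw [pvFilterMapIfP (p := fun j : Nat => pvM matrix (t + 1) j < pvColmax matrix t j)
        (e := fun j : Nat => (((t + 1 : Nat) : Int), ((j : Nat) : Int)))]
    unfold pvHits
    rw [hwlen]
    have hf : List.filter (fun a => decide (pvM matrix (t + 1) a < pvColmax matrix t a))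
          (List.range w) =
        List.filter (fun j => pvBad matrix (t + 1) j) (List.range w) :=
      List.filter_congr (fun j _ => (pvBad_succ matrix t j).symm)
    rw [hf]

lemma pvTakeMap (X : List Int) (w : Nat) (h : w ≤ X.length) :
    X.take w = (List.range w).map (fun j => X.getD j 0) := by
  apply List.ext_getElem
  · simp
    omega
  · intro k h1 h2
    have hk : k < w := by simpa using h2
    simp [List.getD_eq_getElem?_getD, List.getElem?_eq_getElem (show k < X.length by omega)]

lemma pvHits_zero (matrix : List (List Int)) : pvHits matrix 0 = [] := by
  simp [pvHits, pvBad]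

lemma pvB_char (matrix : List (List Int)) (hpre : Pre_ex9 matrix) :
    ex9_alt matrix = ((List.range matrix.length).reverse).flatMap (pvHits matrix) := by
  cases matrix with
  | nil => rfl
  | cons r0 rest =>
    set w := r0.length with hw
    set m := rest.length with hm
    have hwlen : (r0 :: rest).headI.length = w := rfl
    have hrowlen : ∀ i : Nat, i < m + 1 → w ≤ ((r0 :: rest).getD i []).length := by
      intro i hi
      apply hpre
      have : ((r0 :: rest).getD i []) = (r0 :: rest)[i]'(by simp; omega) := by
        rw [List.getD_eq_getElem?_getD, List.getElem?_eq_getElem (by simp; omega)]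
        rfl
      rw [this]; exact List.getElem_mem _
    have hrow : ∀ i : Nat, i < m + 1 →
        PySem.List.slice (PySem.List.pyGetD (r0 :: rest) ((i : Nat) : Int) []) none (some (w : Int)) =
          (List.range w).map (fun j => pvM (r0 :: rest) i j) := by
      intro i hi
      rw [PySem.List.pyGetD_natCast, PySem.List.slice_to_natCast,
        pvTakeMap _ w (hrowlen i hi)]
      rfl
    have hinit : PySem.List.slice r0 none (some (w : Int)) = pvMx (r0 :: rest) w 0 := by
      rw [PySem.List.slice_to_natCast]
      have h1 : pvMx (r0 :: rest) w 0 = (List.range w).map (fun j => r0.getD j 0) := by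
        unfold pvMx
        apply List.map_congr_left
        intro j _
        simp [pvColmax, pvM]
      rw [h1, pvSelfMap, List.take_length]
    have houter : ∀ t : Nat, t ≤ m →
        (PySem.List.pyRange 1 (1 + (t : Int)) 1).foldl (pvStep (r0 :: rest) (w : Int))
            (pvMx (r0 :: rest) w 0, []) =
          (pvMx (r0 :: rest) w t, (List.range' 1 t).map (pvHits (r0 :: rest))) := by
      intro t
      induction t with
      | zero =>
        intro _
        rw [PySem.List.pyRange_one_eq_nil (by norm_num)]
        rfl
      | succ t ih =>
        intro ht
        have h1 : (1 + ((t + 1 : Nat) : Int)) = (1 + (t : Int)) + 1 := by push_cast; ring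
        rw [h1, PySem.List.pyRange_one_succ_right (by omega), List.foldl_append]
        rw [ih (by omega)]
        have h2 : ((1 : Int) + (t : Int)) = (((t + 1 : Nat) : Nat) : Int) := by push_cast; ring
        simp only [List.foldl_cons, List.foldl_nil, h2]
        rw [pvStep_eq (r0 :: rest) w t _ (hrow (t + 1) (by omega)) hwlen]
        rw [List.range'_concat, List.map_append]
        simp [Nat.add_comm 1 t]
    have key : ex9_alt (r0 :: rest) =
        ((PySem.List.pyRange 1 (((r0 :: rest).length : Nat) : Int) 1).foldl
            (pvStep (r0 :: rest) (w : Int))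
            (PySem.List.slice r0 none (some (w : Int)), [])).2.reverse.flatMap
          (fun hits => hits) := rfl
    rw [key, hinit]
    have hlen : (((r0 :: rest).length : Nat) : Int) = 1 + (m : Int) := by
      simp [hm]; ring
    rw [hlen, houter m (le_refl m)]
    -- now both sides
    rw [← List.map_reverse, List.flatMap_map]
    have hrange : (List.range ((r0 :: rest).length)).reverse = (List.range' 1 m).reverse ++ [0] := by
      have : (r0 :: rest).length = m + 1 := by simp [hm]
      rw [this, List.range_eq_range', List.range'_succ, List.reverse_cons]
    rw [hrange, List.flatMap_append]
    simp [pvHits_zero]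

-- ===== VERDICT (by name: the statement is the Claim_ definition above) =====
theorem ex9_spec : Claim_equal_ex9 := by
  intro matrix _ hpre
  unfold Spec_ex9
  rw [pvA_char, pvB_char matrix hpre]
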